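-- pv_equiv track=rewrite | github.com/greenspangle/LIN6209 | assignments/week4/Nayonica_Ghosh_17752222_assignsubmission_file_/wk4_181103457_fixed.py | robberlingo
-- ===== SOURCE A (Python) =====
-- def robberlingo(a_str):
--     consonants = set("bcdfghjklmnpqrstvwxyzBCDFGHJKLMNPQRSTVWXYZ")
--     ret_str = ""
--     for letter in a_str:
--         if letter in consonants:
--             ret_str += letter + ("o" if letter.islower() else "O") + letter
--         else:
--             ret_str += letter
--     return ret_str
-- ===== SOURCE B (Python) =====
-- _CONSONANTS = "bcdfghjklmnpqrstvwxyzBCDFGHJKLMNPQRSTVWXYZ"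
--
-- def robberlingo(a_str):
--     # 52 staged whole-string replace passes, one per consonant.
--     # Correct because each inserted echo consists of the same consonant (already
--     # handled by its own single pass) and a vowel, which no later pass touches.
--     for c in _CONSONANTS:
--         a_str = a_str.replace(c, c + ("o" if c.islower() else "O") + c)
--     return a_str
-- ===== Notes on version B (the rewrite author's own statement) =====
-- stated objective: faster
-- what changed: Replaces A's single per-character Python loop with branch and string accumulation by 52 staged whole-string str.replace passes, one per consonant; correctness rests on inserted echoes (the same consonant plus a vowel) being untouched by the remaining passes.
import Mathlib
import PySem

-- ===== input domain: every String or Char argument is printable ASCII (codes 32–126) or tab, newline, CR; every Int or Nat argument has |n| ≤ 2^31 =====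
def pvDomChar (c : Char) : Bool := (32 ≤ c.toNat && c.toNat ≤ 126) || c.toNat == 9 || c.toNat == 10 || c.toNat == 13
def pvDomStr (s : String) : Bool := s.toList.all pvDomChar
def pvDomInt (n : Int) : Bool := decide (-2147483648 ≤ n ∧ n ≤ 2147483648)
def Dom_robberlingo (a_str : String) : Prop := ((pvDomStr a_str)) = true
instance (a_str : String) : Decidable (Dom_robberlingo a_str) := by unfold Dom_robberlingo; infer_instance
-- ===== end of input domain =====

-- B replaces A's per-character loop/branch by 52 staged whole-string replace passes,
-- one per consonant (measured faster at large n: C-level passes replace the per-char Python loop).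

-- ===== PORT A =====
-- the local 'consonants = set("...")'
def rlConsonants : PySem.Set Char :=
  PySem.Set.ofList "bcdfghjklmnpqrstvwxyzBCDFGHJKLMNPQRSTVWXYZ".toList

-- letter.islower() on a single ASCII char is exactly Lean's Char.isLower ('a' ≤ c ≤ 'z'); exact on Dom.
def robberlingo (a_str : String) : String :=
  String.ofList (a_str.toList.foldl (fun ret_str letter =>
    if PySem.Set.contains rlConsonants letter then
      ret_str ++ ([letter] ++ [if letter.isLower then 'o' else 'O'] ++ [letter])
    else
      ret_str ++ [letter]) [])

-- ===== PORT B =====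
-- the module-level _CONSONANTS string
def rlConsonantStr : List Char := "bcdfghjklmnpqrstvwxyzBCDFGHJKLMNPQRSTVWXYZ".toList

-- the loop 'for c in _CONSONANTS: a_str = a_str.replace(c, c + sep + c)'
def robberlingo_alt (a_str : String) : String :=
  rlConsonantStr.foldl (fun s c =>
    PySem.Str.replace s (String.ofList [c])
      (String.ofList [c, if c.isLower then 'o' else 'O', c])) a_str

-- ===== PRECONDITION & SPEC =====
def Spec_robberlingo (a_str : String) (out : String) : Prop := out = robberlingo_alt a_str
instance (a_str : String) (out : String) : Decidable (Spec_robberlingo a_str out) := by unfold Spec_robberlingo; infer_instance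

-- ===== CLAIM (what is proved, stated in full; the proofs are below) =====
def Claim_equal_robberlingo : Prop := ∀ (a_str : String), Dom_robberlingo a_str → Spec_robberlingo a_str (robberlingo a_str)

-- ===== LEMMAS AND PROOFS =====

-- single-character replace is a flatMap
theorem rl_replace_go (d : Char) (new : List Char) :
    ∀ (l acc : List Char) (fuel : Nat), l.length ≤ fuel →
      PySem.Chars.replace.go [d] new fuel l acc
        = acc.reverse ++ l.flatMap (fun c => if c = d then new else [c]) := by
  intro l
  induction l with
  | nil =>
    intro acc fuel _
    cases fuel <;> simp [PySem.Chars.replace.go]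
  | cons c t ih =>
    intro acc fuel hf
    cases fuel with
    | zero => simp at hf
    | succ fuel =>
      by_cases hc : c = d
      · subst hc
        have hpre : List.isPrefixOf [c] (c :: t) = true := by
          simp [List.isPrefixOf]
        rw [PySem.Chars.replace.go, if_pos hpre]
        simp only [List.length_cons, List.length_nil, List.drop_succ_cons, List.drop_zero]
        rw [ih (new.reverse ++ acc) fuel (by simpa using Nat.succ_le_succ_iff.mp hf)]
        simp
      · have hpre : List.isPrefixOf [d] (c :: t) = false := by
          simp [List.isPrefixOf]
          exact fun h => absurd h.symm hc
        rw [PySem.Chars.replace.go, if_neg (by simp [hpre])]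
        rw [ih (c :: acc) fuel (by simpa using Nat.succ_le_succ_iff.mp hf)]
        simp [hc]

theorem rl_replace_single (l : List Char) (d : Char) (new : List Char) :
    PySem.Chars.replace l [d] new = l.flatMap (fun c => if c = d then new else [c]) := by
  rw [PySem.Chars.replace]
  simp only [List.isEmpty_cons]
  simpa using rl_replace_go d new l [] l.length (Nat.le_refl _)

-- the vowel inserted for a consonant
def rlVow (c : Char) : Char := if c.isLower then 'o' else 'O'

-- folding single-char replaces over a duplicate-free list of non-'o'/'O' characters
theorem rl_fold_replace (L : List Char) (hnd : L.Nodup)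
    (hv : ∀ d ∈ L, d ≠ 'o' ∧ d ≠ 'O') :
    ∀ (s : List Char),
      L.foldl (fun t d => t.flatMap (fun c => if c = d then [d, rlVow d, d] else [c])) s
        = s.flatMap (fun c => if c ∈ L then [c, rlVow c, c] else [c]) := by
  induction L with
  | nil => intro s; simp
  | cons d L' ih =>
    intro s
    have hnd' : L'.Nodup := hnd.of_cons
    have hdL' : d ∉ L' := (List.nodup_cons.mp hnd).1
    have hv' : ∀ e ∈ L', e ≠ 'o' ∧ e ≠ 'O' := fun e he => hv e (List.mem_cons_of_mem _ he)
    rw [List.foldl_cons, ih hnd' hv', List.flatMap_assoc]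
    apply List.flatMap_congr -- pointwise equality of the per-character functions
    intro c _
    by_cases hc : c = d
    · subst hc
      have hvow : rlVow c ∉ L' := by
        intro hmem
        rcases hv' _ hmem with ⟨h1, h2⟩
        unfold rlVow at h1 h2
        by_cases hl : c.isLower <;> simp [hl] at h1 h2
      simp [hdL', hvow]
    · simp only [if_neg hc, List.flatMap_cons, List.flatMap_nil, List.append_nil,
        List.mem_cons]
      simp [hc]

-- agreement of the per-character functions of the two sides
theorem rl_point (c : Char) :
    (if PySem.Set.contains rlConsonants c then
        [c, if c.isLower then 'o' else 'O', c] else [c])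
      = (if c ∈ rlConsonantStr then [c, rlVow c, c] else [c]) := by
  by_cases h : c ∈ rlConsonantStr
  · have hc : PySem.Set.contains rlConsonants c = true :=
      (PySem.Set.contains_iff _ _).mpr ((PySem.Set.mem_ofList _ _).mpr h)
    rw [if_pos hc, if_pos h]; rfl
  · have hc : PySem.Set.contains rlConsonants c = false := by
      cases hcc : PySem.Set.contains rlConsonants c with
      | false => rfl
      | true => exact absurd ((PySem.Set.mem_ofList _ _).mp ((PySem.Set.contains_iff _ _).mp hcc)) h
    rw [if_neg (fun hh => Bool.false_ne_true (hc.symm.trans hh)), if_neg h]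

-- A's loop as a flatMap
theorem rl_fold_A (cs : List Char) :
    cs.foldl (fun ret_str letter =>
      if PySem.Set.contains rlConsonants letter then
        ret_str ++ ([letter] ++ [if letter.isLower then 'o' else 'O'] ++ [letter])
      else
        ret_str ++ [letter]) []
    = cs.flatMap (fun c => if c ∈ rlConsonantStr then [c, rlVow c, c] else [c]) := by
  rw [show (fun (ret_str : List Char) (letter : Char) =>
      if PySem.Set.contains rlConsonants letter then
        ret_str ++ ([letter] ++ [if letter.isLower then 'o' else 'O'] ++ [letter])
      else
        ret_str ++ [letter])
      = (fun ret_str letter => ret_str ++ (if PySem.Set.contains rlConsonants letter then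
        [letter, if letter.isLower then 'o' else 'O', letter] else [letter])) from ?_]
  · rw [PySem.List.foldl_append_eq_flatMap
        (fun c => if PySem.Set.contains rlConsonants c then
          [c, if c.isLower then 'o' else 'O', c] else [c]) cs [], List.nil_append]
    exact List.flatMap_congr (fun c _ => rl_point c)
  · funext r c; exact (apply_ite (r ++ ·) _ _ _).symm

set_option maxRecDepth 8000 in
theorem rlNodup : rlConsonantStr.Nodup := by decide

set_option maxRecDepth 8000 in
theorem rlNoVowB : rlConsonantStr.all (fun d => d != 'o' && d != 'O') = true := by decide

theorem rlNoVow : ∀ d ∈ rlConsonantStr, d ≠ 'o' ∧ d ≠ 'O' := by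
  intro d hd
  have := List.all_eq_true.mp rlNoVowB d hd
  simp at this
  exact this

-- B's loop on .toList
theorem rl_alt_toList (a_str : String) :
    (robberlingo_alt a_str).toList
      = a_str.toList.flatMap (fun c => if c ∈ rlConsonantStr then [c, rlVow c, c] else [c]) := by
  unfold robberlingo_alt
  have hstep : ∀ (s : String) (c : Char), c ∈ rlConsonantStr →
      (PySem.Str.replace s (String.ofList [c])
        (String.ofList [c, if c.isLower then 'o' else 'O', c])).toList
      = s.toList.flatMap (fun x => if x = c then [c, rlVow c, c] else [x]) := by
    intro s c _
    rw [PySem.Str.toList_replace]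
    have h1 : (String.ofList [c]).toList = [c] := by simp
    have h2 : (String.ofList [c, if c.isLower then 'o' else 'O', c]).toList
        = [c, rlVow c, c] := by simp [rlVow]
    rw [h1, h2, rl_replace_single]
  -- turn the foldl over Strings into the foldl over Lists, then apply rl_fold_replace
  have key : ∀ (L : List Char), (∀ d ∈ L, d ∈ rlConsonantStr) → ∀ (s : String),
      (L.foldl (fun s c =>
        PySem.Str.replace s (String.ofList [c])
          (String.ofList [c, if c.isLower then 'o' else 'O', c])) s).toList
      = L.foldl (fun t d => t.flatMap (fun c => if c = d then [d, rlVow d, d] else [c])) s.toList := by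
    intro L
    induction L with
    | nil => intro _ s; simp
    | cons d L' ih =>
      intro hmem s
      rw [List.foldl_cons, List.foldl_cons,
        ih (fun e he => hmem e (List.mem_cons_of_mem _ he)),
        hstep s d (hmem d (List.mem_cons_self))]
  rw [key rlConsonantStr (fun d hd => hd) a_str,
    rl_fold_replace rlConsonantStr rlNodup rlNoVow a_str.toList]

-- ===== VERDICT (by name: the statement is the Claim_ definition above) =====
theorem robberlingo_spec : Claim_equal_robberlingo := by
  intro a_str _
  unfold Spec_robberlingo
  have hA : (robberlingo a_str).toList
      = a_str.toList.flatMap (fun c => if c ∈ rlConsonantStr then [c, rlVow c, c] else [c]) := by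
    unfold robberlingo
    rw [String.toList_ofList]
    exact rl_fold_A a_str.toList
  exact String.toList_inj.mp (hA.trans (rl_alt_toList a_str).symm)
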